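-- pv_equiv track=rewrite | github.com/terrafirma2021/ODB-0100-PID-Calc | pid calc.py | process_pids
-- ===== SOURCE A (Python) =====
-- def set_pid_bit(pid_ranges, pid):
--     for range_key, range_info in pid_ranges.items():
--         start, end = range_info['range']
--         if start <= pid <= end:
--             range_info['data'][pid - start] = 1
--             return
--
-- def binary_array_to_hex(binary_array):
--     hex_string = ''.join(f'{int("".join(map(str, binary_array[i:i+8])), 2):02X}' for i in range(0, 32, 8))
--     return ' '.join(hex_string[i:i+2] for i in range(0, len(hex_string), 2))
--
-- def process_pids(input_pids_hex):
--     pid_ranges = {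
--         "0100": {"range": (0x01, 0x20), "data": [0] * 32, "flag": False},
--         "0120": {"range": (0x21, 0x40), "data": [0] * 32, "flag": False},
--         "0140": {"range": (0x41, 0x60), "data": [0] * 32, "flag": False},
--         "0160": {"range": (0x61, 0x80), "data": [0] * 32, "flag": False},
--         "0180": {"range": (0x81, 0xA0), "data": [0] * 32, "flag": False},
--         "01A0": {"range": (0xA1, 0xC0), "data": [0] * 32, "flag": False},
--         "01C0": {"range": (0xC1, 0xE0), "data": [0] * 32, "flag": False},
--     }
--
--     highest_pid = max(int(pid_hex, 16) for pid_hex in input_pids_hex if 0x01 <= int(pid_hex, 16) <= 0xE0)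
--
--     for pid_hex in input_pids_hex:
--         pid = int(pid_hex, 16)
--         if 0x01 <= pid <= 0xE0:
--             set_pid_bit(pid_ranges, pid)
--
--     for range_key, range_info in pid_ranges.items():
--         start, end = range_info['range']
--         if start <= highest_pid < end:
--             continue
--         if start < highest_pid:
--             set_pid_bit(pid_ranges, end)
--             range_info['flag'] = True
--
--     for range_key, range_info in pid_ranges.items():
--         if any(range_info['data']) or range_info['flag']:
--             hex_data = binary_array_to_hex(range_info['data'])
--             output_line = f"{range_key}:\n41 {range_key[2:]} {hex_data}"
--             pid_ranges[range_key]['output'] = output_line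
--
--     output = [info['output'] for info in pid_ranges.values() if 'output' in info]
--
--     return output
-- ===== SOURCE B (Python) =====
-- _LABELS = ("0100", "0120", "0140", "0160", "0180", "01A0", "01C0")
--
-- def process_pids(input_pids_hex):
--     # Invert the traversal: instead of scattering each pid into mutable per-range
--     # records, build an immutable set of in-range pids once, then sweep the fixed
--     # 7x32 output grid, deciding each bit by set membership (with the continuation
--     # bit folded into the per-position condition) and summing byte values directly.
--     inr = {p for p in (int(h, 16) for h in input_pids_hex) if 0x01 <= p <= 0xE0}
--     highest = max(inr)
--     out = []
--     for b, label in enumerate(_LABELS):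
--         cont = highest >= 32 * (b + 1)
--         vals = [sum(128 >> i for i in range(8)
--                     if (32 * b + 8 * k + i + 1) in inr or (cont and 8 * k + i == 31))
--                 for k in range(4)]
--         if any(vals):
--             out.append(f"{label}:\n41 {label[2:]} " + ' '.join(f'{v:02X}' for v in vals))
--     return out
-- ===== Notes on version B (the rewrite author's own statement) =====
-- stated objective: alternative
-- what changed: Inverts the traversal: instead of iterating pids and scattering bits into mutable per-range records (then patching a continuation bit and converting 0/1 lists to hex via string joins), B builds one immutable set of in-range pids and sweeps the fixed 7x32 output grid, deciding each bit by set membership with the continuation condition folded into the per-position predicate, and accumulating byte values arithmetically.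
import Mathlib
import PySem

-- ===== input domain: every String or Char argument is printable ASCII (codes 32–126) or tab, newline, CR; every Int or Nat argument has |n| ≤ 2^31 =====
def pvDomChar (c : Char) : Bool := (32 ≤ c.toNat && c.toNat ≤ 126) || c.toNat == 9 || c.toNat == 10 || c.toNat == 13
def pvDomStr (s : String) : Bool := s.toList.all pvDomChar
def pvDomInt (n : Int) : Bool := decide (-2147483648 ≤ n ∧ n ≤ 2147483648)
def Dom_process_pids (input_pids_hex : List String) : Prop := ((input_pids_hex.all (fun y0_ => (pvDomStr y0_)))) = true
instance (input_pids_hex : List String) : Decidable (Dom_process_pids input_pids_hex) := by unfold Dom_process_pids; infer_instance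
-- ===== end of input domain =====

-- B inverts the traversal: instead of scattering pids into mutable per-range records, it builds one
-- immutable set of in-range pids and sweeps the fixed 7x32 output grid, deciding each bit by set
-- membership (continuation folded into the per-position predicate) and summing byte values directly.

-- ===== shared helpers (ports of Python built-ins used by BOTH sources) =====

-- f'{n:0wX}' for n >= 0: minimal uppercase hex digits, left-padded with '0' to width w (exact for nonnegative n)
def pyHexDig (n : Nat) : Char := ['0','1','2','3','4','5','6','7','8','9','A','B','C','D','E','F'].getD n '0'

def pyHexChars (n : Nat) : List Char :=
  if _h : n < 16 then [pyHexDig n]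
  else pyHexChars (n / 16) ++ [pyHexDig (n % 16)]
decreasing_by exact Nat.div_lt_self (by omega) (by omega)

def pyHexPad (w n : Nat) : List Char :=
  List.replicate (w - (pyHexChars n).length) '0' ++ pyHexChars n

-- ===== PORT A =====

structure PidInfo where
  range : Int × Int
  data : List Int
  flag : Bool
  output : Option String
deriving Repr, DecidableEq

def set_pid_bit : List (String × PidInfo) → Int → List (String × PidInfo)
  | [], _ => []
  | (k, ⟨(s, e), data, flag, output⟩) :: rest, pid =>
    if s ≤ pid ∧ pid ≤ e then
      -- data[pid - start] = 1 : in this branch 0 ≤ pid - start, so .toNat is exact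
      (k, ⟨(s, e), data.set (pid - s).toNat 1, flag, output⟩) :: rest
    else
      (k, ⟨(s, e), data, flag, output⟩) :: set_pid_bit rest pid

-- exact port of int("".join(map(str, chunk)), 2) for the 0/1 chunks binary_array_to_hex feeds it
def chunkVal (chunk : List Int) : Nat :=
  chunk.foldl (fun a d => 2 * a + d.toNat) 0

def binary_array_to_hex (binary_array : List Int) : List Char :=
  let hex_string := PySem.Chars.join []
    ((PySem.List.pyRange 0 32 8).map (fun i =>
      pyHexPad 2 (chunkVal (PySem.List.slice binary_array (some i) (some (i + 8))))))
  PySem.Chars.join [' ']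
    ((PySem.List.pyRange 0 (hex_string.length : Int) 2).map (fun i =>
      PySem.List.slice hex_string (some i) (some (i + 2))))

def pidRangesInit : List (String × PidInfo) :=
  [("0100", ⟨(0x01, 0x20), List.replicate 32 0, false, none⟩),
   ("0120", ⟨(0x21, 0x40), List.replicate 32 0, false, none⟩),
   ("0140", ⟨(0x41, 0x60), List.replicate 32 0, false, none⟩),
   ("0160", ⟨(0x61, 0x80), List.replicate 32 0, false, none⟩),
   ("0180", ⟨(0x81, 0xA0), List.replicate 32 0, false, none⟩),
   ("01A0", ⟨(0xA1, 0xC0), List.replicate 32 0, false, none⟩),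
   ("01C0", ⟨(0xC1, 0xE0), List.replicate 32 0, false, none⟩)]

-- f"{range_key}:\n41 {range_key[2:]} {hex_data}"
def mkLine (k : String) (data : List Int) : String :=
  String.ofList (k.toList ++ ':' :: '\n' :: '4' :: '1' :: ' ' ::
    (PySem.List.slice k.toList (some 2) none ++ ' ' :: binary_array_to_hex data))

-- one iteration of A's second loop; iterating the dict's items() while mutating is exact on the
-- snapshot because each iteration mutates only its own entry (set_pid_bit end hits the same range)
def contStep (highest : Int) (st : List (String × PidInfo)) (e : String × PidInfo) : List (String × PidInfo) :=
  let (s, e2) := e.2.range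
  if s ≤ highest ∧ highest < e2 then st
  else if s < highest then
    (set_pid_bit st e2).map (fun e' => if e'.1 = e.1 then (e'.1, { e'.2 with flag := true }) else e')
  else st

-- one iteration of A's third loop (again folded over the snapshot; each step writes only its own entry's output)
def outStep (st : List (String × PidInfo)) (e : String × PidInfo) : List (String × PidInfo) :=
  if e.2.data.any (fun x => decide (x ≠ 0)) || e.2.flag then
    st.map (fun e' => if e'.1 = e.1 then (e'.1, { e'.2 with output := some (mkLine e.1 e.2.data) }) else e')
  else st

def process_pids (input_pids_hex : List String) : List String :=
  -- int(pid_hex, 16) raises ValueError on a bad string and max() on an empty generator: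
  -- both are excluded by Pre_, so the .getD 0 defaults are never read under Pre_
  let highest : Int :=
    (PySem.List.max?
      ((input_pids_hex.filter (fun s =>
          decide (1 ≤ (PySem.Int.ofStrBase? s 16).getD 0 ∧ (PySem.Int.ofStrBase? s 16).getD 0 ≤ 0xE0))).map
        (fun s => (PySem.Int.ofStrBase? s 16).getD 0))
      (fun x => x)).getD 0
  let st1 := input_pids_hex.foldl (fun st s =>
      let pid := (PySem.Int.ofStrBase? s 16).getD 0
      if 1 ≤ pid ∧ pid ≤ 0xE0 then set_pid_bit st pid else st) pidRangesInit
  let st2 := st1.foldl (contStep highest) st1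
  let st3 := st2.foldl outStep st2
  st3.filterMap (fun e => e.2.output)

-- ===== PORT B =====

def process_pids_alt (input_pids_hex : List String) : List String :=
  -- inr = {p for p in (int(h,16) for h in input_pids_hex) if 0x01 <= p <= 0xE0}
  let inr : List Int := PySem.Set.ofList
    ((input_pids_hex.map (fun h => (PySem.Int.ofStrBase? h 16).getD 0)).filter
      (fun p => decide (1 ≤ p ∧ p ≤ 0xE0)))
  -- highest = max(inr)  (ValueError on an empty set is excluded by Pre_)
  let highest : Int := (PySem.List.max? inr (fun x => x)).getD 0
  (PySem.List.enumerate ["0100", "0120", "0140", "0160", "0180", "01A0", "01C0"]).foldl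
    (fun out e =>
      let cont : Bool := decide (32 * (e.1 + 1) ≤ highest)
      -- vals = [sum(128 >> i for i in range(8) if (32*b+8*k+i+1) in inr or (cont and 8*k+i == 31)) for k in range(4)]
      let vals : List Nat := (List.range 4).map (fun (k : Nat) =>
        (List.range 8).foldl (fun (a : Nat) (i : Nat) =>
          if (decide ((32 * e.1 + 8 * (k : Int) + (i : Int) + 1) ∈ inr) || (cont && decide (8 * k + i = 31)))
          then a + ((128 : Nat) >>> i) else a) (0 : Nat))
      if vals.any (fun v => decide (v ≠ 0)) then
        out ++ [String.ofList (e.2.toList ++ ':' :: '\n' :: '4' :: '1' :: ' ' ::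
          (PySem.List.slice e.2.toList (some 2) none ++ ' ' ::
            PySem.Chars.join [' '] (vals.map (fun v => pyHexPad 2 v))))]
      else out) []

-- ===== PRECONDITION & SPEC =====

-- Pre_ excludes exactly the inputs where A raises: a string int(·,16) rejects (ValueError),
-- or no parsed value lies in [0x01, 0xE0] so max() gets an empty sequence (ValueError).
def Pre_process_pids (input_pids_hex : List String) : Prop :=
  (∀ s ∈ input_pids_hex, (PySem.Int.ofStrBase? s 16).isSome = true) ∧
  (∃ s ∈ input_pids_hex,
    1 ≤ (PySem.Int.ofStrBase? s 16).getD 0 ∧ (PySem.Int.ofStrBase? s 16).getD 0 ≤ 0xE0)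
instance (input_pids_hex : List String) : Decidable (Pre_process_pids input_pids_hex) := by
  unfold Pre_process_pids; infer_instance

def pvWitness_process_pids : List String := ["1F", "03", "a0"]

def Spec_process_pids (input_pids_hex : List String) (out : List String) : Prop := out = process_pids_alt input_pids_hex
instance (input_pids_hex : List String) (out : List String) : Decidable (Spec_process_pids input_pids_hex out) := by unfold Spec_process_pids; infer_instance

-- ===== CLAIM (what is proved, stated in full; the proofs are below) =====
def Claim_equal_process_pids : Prop := ∀ (input_pids_hex : List String), Dom_process_pids input_pids_hex → Pre_process_pids input_pids_hex → Spec_process_pids input_pids_hex (process_pids input_pids_hex)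

-- ===== LEMMAS AND PROOFS =====

-- ===== proof-side helpers =====

def i01 (b : Bool) : Int := if b then 1 else 0

-- the per-position bit predicate both programs compute for block base = 32*b
def cbits (base : Int) (L : List Int) (c : Bool) (j : Nat) : Bool :=
  decide ((base + (j : Int) + 1) ∈ L) || (c && decide (j = 31))

-- A's data list for a block as the indicator of membership in the processed pid list
def ind (base : Int) (L : List Int) : List Int :=
  (List.range 32).map (fun (j : Nat) => i01 (decide ((base + (j : Int) + 1) ∈ L)))

-- B's byte value for one chunk, written out
def val8 (b0 b1 b2 b3 b4 b5 b6 b7 : Bool) : Nat :=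
  (if b0 then 128 else 0) + (if b1 then 64 else 0) + (if b2 then 32 else 0) + (if b3 then 16 else 0) +
  (if b4 then 8 else 0) + (if b5 then 4 else 0) + (if b6 then 2 else 0) + (if b7 then 1 else 0)

-- one block of B's output, with the continuation bool abstracted
def bValsC (b : Int) (L : List Int) (c : Bool) : List Nat :=
  (List.range 4).map (fun (k : Nat) =>
    (List.range 8).foldl (fun (a : Nat) (i : Nat) =>
      if (decide ((32 * b + 8 * (k : Int) + (i : Int) + 1) ∈ L) || (c && decide (8 * k + i = 31)))
      then a + ((128 : Nat) >>> i) else a) (0 : Nat))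

def blkC (b : Int) (label : String) (L : List Int) (c : Bool) : List String :=
  if (bValsC b L c).any (fun v => decide (v ≠ 0)) then
    [String.ofList (label.toList ++ ':' :: '\n' :: '4' :: '1' :: ' ' ::
      (PySem.List.slice label.toList (some 2) none ++ ' ' ::
        PySem.Chars.join [' '] ((bValsC b L c).map (fun v => pyHexPad 2 v))))]
  else []

-- the generic shape of A's state
def stA (d0 d1 d2 d3 d4 d5 d6 : List Int) (f0 f1 f2 f3 f4 f5 f6 : Bool)
    (o0 o1 o2 o3 o4 o5 o6 : Option String) : List (String × PidInfo) :=
[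
   ("0100", ⟨(1, 32), d0, f0, o0⟩),
   ("0120", ⟨(33, 64), d1, f1, o1⟩),
   ("0140", ⟨(65, 96), d2, f2, o2⟩),
   ("0160", ⟨(97, 128), d3, f3, o3⟩),
   ("0180", ⟨(129, 160), d4, f4, o4⟩),
   ("01A0", ⟨(161, 192), d5, f5, o5⟩),
   ("01C0", ⟨(193, 224), d6, f6, o6⟩)]

lemma ind_nil (base : Int) : ind base [] = List.replicate 32 0 := by
  simp [ind, i01, List.map_const']

lemma ind_skip (base : Int) (L : List Int) (p : Int)
    (h : ¬(base + 1 ≤ p ∧ p ≤ base + 32)) : ind base (L ++ [p]) = ind base L := by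
  unfold ind
  apply List.map_congr_left
  intro j hj
  rw [List.mem_range] at hj
  have hne : ¬(base + (j : Int) + 1 = p) := by omega
  simp [hne]

lemma ind_set (base s : Int) (hs : s = base + 1) (L : List Int) (p : Int)
    (h1 : s ≤ p) (h2 : p ≤ base + 32) :
    (ind base L).set (p - s).toNat 1 = ind base (L ++ [p]) := by
  subst hs
  unfold ind
  apply List.ext_getElem
  · simp
  · intro j hj _
    simp only [List.length_set, List.length_map, List.length_range] at hj
    simp only [List.getElem_set, List.getElem_map, List.getElem_range, List.mem_append,
      List.mem_singleton]
    by_cases h : (p - (base + 1)).toNat = j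
    · have he : base + (j : Int) + 1 = p := by omega
      simp [h, he, i01]
    · have hne : ¬(base + (j : Int) + 1 = p) := by omega
      simp [h, hne]


lemma setbit_sim (p : Int) (hp1 : 1 ≤ p) (hp2 : p ≤ 224) (L : List Int)
    (f0 f1 f2 f3 f4 f5 f6 : Bool) (o0 o1 o2 o3 o4 o5 o6 : Option String) :
    set_pid_bit (stA (ind 0 L) (ind 32 L) (ind 64 L) (ind 96 L) (ind 128 L) (ind 160 L) (ind 192 L)
      f0 f1 f2 f3 f4 f5 f6 o0 o1 o2 o3 o4 o5 o6) p
    = stA (ind 0 (L ++ [p])) (ind 32 (L ++ [p])) (ind 64 (L ++ [p])) (ind 96 (L ++ [p]))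
        (ind 128 (L ++ [p])) (ind 160 (L ++ [p])) (ind 192 (L ++ [p])) f0 f1 f2 f3 f4 f5 f6 o0 o1 o2 o3 o4 o5 o6 := by
  rcases (by omega : (1 ≤ p ∧ p ≤ 32) ∨ (33 ≤ p ∧ p ≤ 64) ∨ (65 ≤ p ∧ p ≤ 96) ∨ (97 ≤ p ∧ p ≤ 128) ∨ (129 ≤ p ∧ p ≤ 160) ∨ (161 ≤ p ∧ p ≤ 192) ∨ (193 ≤ p ∧ p ≤ 224)) with h | h | h | h | h | h | h
  · simp only [stA, set_pid_bit, if_pos (by omega : (1:Int) ≤ p ∧ p ≤ 32)]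
    rw [ind_set 0 1 (by norm_num) L p (by omega) (by omega)]
    rw [ind_skip 32 L p (by omega)]
    rw [ind_skip 64 L p (by omega)]
    rw [ind_skip 96 L p (by omega)]
    rw [ind_skip 128 L p (by omega)]
    rw [ind_skip 160 L p (by omega)]
    rw [ind_skip 192 L p (by omega)]
  · simp only [stA, set_pid_bit, if_neg (by omega : ¬((1:Int) ≤ p ∧ p ≤ 32)), if_pos (by omega : (33:Int) ≤ p ∧ p ≤ 64)]
    rw [ind_set 32 33 (by norm_num) L p (by omega) (by omega)]
    rw [ind_skip 0 L p (by omega)]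
    rw [ind_skip 64 L p (by omega)]
    rw [ind_skip 96 L p (by omega)]
    rw [ind_skip 128 L p (by omega)]
    rw [ind_skip 160 L p (by omega)]
    rw [ind_skip 192 L p (by omega)]
  · simp only [stA, set_pid_bit, if_neg (by omega : ¬((1:Int) ≤ p ∧ p ≤ 32)), if_neg (by omega : ¬((33:Int) ≤ p ∧ p ≤ 64)), if_pos (by omega : (65:Int) ≤ p ∧ p ≤ 96)]
    rw [ind_set 64 65 (by norm_num) L p (by omega) (by omega)]
    rw [ind_skip 0 L p (by omega)]
    rw [ind_skip 32 L p (by omega)]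
    rw [ind_skip 96 L p (by omega)]
    rw [ind_skip 128 L p (by omega)]
    rw [ind_skip 160 L p (by omega)]
    rw [ind_skip 192 L p (by omega)]
  · simp only [stA, set_pid_bit, if_neg (by omega : ¬((1:Int) ≤ p ∧ p ≤ 32)), if_neg (by omega : ¬((33:Int) ≤ p ∧ p ≤ 64)), if_neg (by omega : ¬((65:Int) ≤ p ∧ p ≤ 96)), if_pos (by omega : (97:Int) ≤ p ∧ p ≤ 128)]
    rw [ind_set 96 97 (by norm_num) L p (by omega) (by omega)]
    rw [ind_skip 0 L p (by omega)]
    rw [ind_skip 32 L p (by omega)]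
    rw [ind_skip 64 L p (by omega)]
    rw [ind_skip 128 L p (by omega)]
    rw [ind_skip 160 L p (by omega)]
    rw [ind_skip 192 L p (by omega)]
  · simp only [stA, set_pid_bit, if_neg (by omega : ¬((1:Int) ≤ p ∧ p ≤ 32)), if_neg (by omega : ¬((33:Int) ≤ p ∧ p ≤ 64)), if_neg (by omega : ¬((65:Int) ≤ p ∧ p ≤ 96)), if_neg (by omega : ¬((97:Int) ≤ p ∧ p ≤ 128)), if_pos (by omega : (129:Int) ≤ p ∧ p ≤ 160)]
    rw [ind_set 128 129 (by norm_num) L p (by omega) (by omega)]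
    rw [ind_skip 0 L p (by omega)]
    rw [ind_skip 32 L p (by omega)]
    rw [ind_skip 64 L p (by omega)]
    rw [ind_skip 96 L p (by omega)]
    rw [ind_skip 160 L p (by omega)]
    rw [ind_skip 192 L p (by omega)]
  · simp only [stA, set_pid_bit, if_neg (by omega : ¬((1:Int) ≤ p ∧ p ≤ 32)), if_neg (by omega : ¬((33:Int) ≤ p ∧ p ≤ 64)), if_neg (by omega : ¬((65:Int) ≤ p ∧ p ≤ 96)), if_neg (by omega : ¬((97:Int) ≤ p ∧ p ≤ 128)), if_neg (by omega : ¬((129:Int) ≤ p ∧ p ≤ 160)), if_pos (by omega : (161:Int) ≤ p ∧ p ≤ 192)]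
    rw [ind_set 160 161 (by norm_num) L p (by omega) (by omega)]
    rw [ind_skip 0 L p (by omega)]
    rw [ind_skip 32 L p (by omega)]
    rw [ind_skip 64 L p (by omega)]
    rw [ind_skip 96 L p (by omega)]
    rw [ind_skip 128 L p (by omega)]
    rw [ind_skip 192 L p (by omega)]
  · simp only [stA, set_pid_bit, if_neg (by omega : ¬((1:Int) ≤ p ∧ p ≤ 32)), if_neg (by omega : ¬((33:Int) ≤ p ∧ p ≤ 64)), if_neg (by omega : ¬((65:Int) ≤ p ∧ p ≤ 96)), if_neg (by omega : ¬((97:Int) ≤ p ∧ p ≤ 128)), if_neg (by omega : ¬((129:Int) ≤ p ∧ p ≤ 160)), if_neg (by omega : ¬((161:Int) ≤ p ∧ p ≤ 192)), if_pos (by omega : (193:Int) ≤ p ∧ p ≤ 224)]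
    rw [ind_set 192 193 (by norm_num) L p (by omega) (by omega)]
    rw [ind_skip 0 L p (by omega)]
    rw [ind_skip 32 L p (by omega)]
    rw [ind_skip 64 L p (by omega)]
    rw [ind_skip 96 L p (by omega)]
    rw [ind_skip 128 L p (by omega)]
    rw [ind_skip 160 L p (by omega)]

lemma fold_sim (f0 f1 f2 f3 f4 f5 f6 : Bool) (o0 o1 o2 o3 o4 o5 o6 : Option String) :
    ∀ (ps : List Int), (∀ q ∈ ps, 1 ≤ q ∧ q ≤ 224) → ∀ (L : List Int),
    ps.foldl set_pid_bit (stA (ind 0 L) (ind 32 L) (ind 64 L) (ind 96 L) (ind 128 L) (ind 160 L)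
        (ind 192 L) f0 f1 f2 f3 f4 f5 f6 o0 o1 o2 o3 o4 o5 o6)
    = stA (ind 0 (L ++ ps)) (ind 32 (L ++ ps)) (ind 64 (L ++ ps)) (ind 96 (L ++ ps))
        (ind 128 (L ++ ps)) (ind 160 (L ++ ps)) (ind 192 (L ++ ps)) f0 f1 f2 f3 f4 f5 f6 o0 o1 o2 o3 o4 o5 o6 := by
  intro ps
  induction ps with
  | nil => intro _ L; simp
  | cons p rest ih =>
    intro h L
    rw [List.foldl_cons, setbit_sim p (h p List.mem_cons_self).1 (h p List.mem_cons_self).2 L,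
      ih (fun q hq => h q (List.mem_cons_of_mem _ hq)) (L ++ [p])]
    simp


lemma contA_0 (h : Int) (d0 d1 d2 d3 d4 d5 d6 : List Int)
    (f0 f1 f2 f3 f4 f5 f6 : Bool) (o0 o1 o2 o3 o4 o5 o6 : Option String)
    (D : List Int) (F : Bool) (O : Option String) :
    contStep h
      [
       ("0100", ⟨(1, 32), d0, f0, o0⟩),
       ("0120", ⟨(33, 64), d1, f1, o1⟩),
       ("0140", ⟨(65, 96), d2, f2, o2⟩),
       ("0160", ⟨(97, 128), d3, f3, o3⟩),
       ("0180", ⟨(129, 160), d4, f4, o4⟩),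
       ("01A0", ⟨(161, 192), d5, f5, o5⟩),
       ("01C0", ⟨(193, 224), d6, f6, o6⟩)]
      ("0100", ⟨(1, 32), D, F, O⟩)
    = [
       ("0100", ⟨(1, 32), (if (32:Int) ≤ h then d0.set 31 1 else d0), (if (32:Int) ≤ h then true else f0), o0⟩),
       ("0120", ⟨(33, 64), d1, f1, o1⟩),
       ("0140", ⟨(65, 96), d2, f2, o2⟩),
       ("0160", ⟨(97, 128), d3, f3, o3⟩),
       ("0180", ⟨(129, 160), d4, f4, o4⟩),
       ("01A0", ⟨(161, 192), d5, f5, o5⟩),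
       ("01C0", ⟨(193, 224), d6, f6, o6⟩)] := by
  by_cases hc : (32:Int) ≤ h
  · simp only [contStep]
    rw [if_neg (by omega : ¬((1:Int) ≤ h ∧ h < 32)), if_pos (by omega : (1:Int) < h)]
    simp only [set_pid_bit, if_pos (by norm_num : (1:Int) ≤ 32 ∧ (32:Int) ≤ 32)]
    rw [show ((32:Int) - 1).toNat = 31 from by decide]
    norm_num [List.map, hc]
    repeat' apply And.intro
    all_goals (intro hx; exact absurd hx (by decide))
  · simp only [contStep]
    by_cases h1 : (1:Int) ≤ h ∧ h < 32
    · rw [if_pos h1]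
      simp [hc]
    · rw [if_neg h1, if_neg (by omega : ¬((1:Int) < h))]
      simp [hc]

lemma contA_1 (h : Int) (d0 d1 d2 d3 d4 d5 d6 : List Int)
    (f0 f1 f2 f3 f4 f5 f6 : Bool) (o0 o1 o2 o3 o4 o5 o6 : Option String)
    (D : List Int) (F : Bool) (O : Option String) :
    contStep h
      [
       ("0100", ⟨(1, 32), d0, f0, o0⟩),
       ("0120", ⟨(33, 64), d1, f1, o1⟩),
       ("0140", ⟨(65, 96), d2, f2, o2⟩),
       ("0160", ⟨(97, 128), d3, f3, o3⟩),
       ("0180", ⟨(129, 160), d4, f4, o4⟩),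
       ("01A0", ⟨(161, 192), d5, f5, o5⟩),
       ("01C0", ⟨(193, 224), d6, f6, o6⟩)]
      ("0120", ⟨(33, 64), D, F, O⟩)
    = [
       ("0100", ⟨(1, 32), d0, f0, o0⟩),
       ("0120", ⟨(33, 64), (if (64:Int) ≤ h then d1.set 31 1 else d1), (if (64:Int) ≤ h then true else f1), o1⟩),
       ("0140", ⟨(65, 96), d2, f2, o2⟩),
       ("0160", ⟨(97, 128), d3, f3, o3⟩),
       ("0180", ⟨(129, 160), d4, f4, o4⟩),
       ("01A0", ⟨(161, 192), d5, f5, o5⟩),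
       ("01C0", ⟨(193, 224), d6, f6, o6⟩)] := by
  by_cases hc : (64:Int) ≤ h
  · simp only [contStep]
    rw [if_neg (by omega : ¬((33:Int) ≤ h ∧ h < 64)), if_pos (by omega : (33:Int) < h)]
    simp only [set_pid_bit, if_neg (by norm_num : ¬((1:Int) ≤ 64 ∧ (64:Int) ≤ 32)), if_pos (by norm_num : (33:Int) ≤ 64 ∧ (64:Int) ≤ 64)]
    rw [show ((64:Int) - 33).toNat = 31 from by decide]
    norm_num [List.map, hc]
    repeat' apply And.intro
    all_goals (intro hx; exact absurd hx (by decide))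
  · simp only [contStep]
    by_cases h1 : (33:Int) ≤ h ∧ h < 64
    · rw [if_pos h1]
      simp [hc]
    · rw [if_neg h1, if_neg (by omega : ¬((33:Int) < h))]
      simp [hc]

lemma contA_2 (h : Int) (d0 d1 d2 d3 d4 d5 d6 : List Int)
    (f0 f1 f2 f3 f4 f5 f6 : Bool) (o0 o1 o2 o3 o4 o5 o6 : Option String)
    (D : List Int) (F : Bool) (O : Option String) :
    contStep h
      [
       ("0100", ⟨(1, 32), d0, f0, o0⟩),
       ("0120", ⟨(33, 64), d1, f1, o1⟩),
       ("0140", ⟨(65, 96), d2, f2, o2⟩),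
       ("0160", ⟨(97, 128), d3, f3, o3⟩),
       ("0180", ⟨(129, 160), d4, f4, o4⟩),
       ("01A0", ⟨(161, 192), d5, f5, o5⟩),
       ("01C0", ⟨(193, 224), d6, f6, o6⟩)]
      ("0140", ⟨(65, 96), D, F, O⟩)
    = [
       ("0100", ⟨(1, 32), d0, f0, o0⟩),
       ("0120", ⟨(33, 64), d1, f1, o1⟩),
       ("0140", ⟨(65, 96), (if (96:Int) ≤ h then d2.set 31 1 else d2), (if (96:Int) ≤ h then true else f2), o2⟩),
       ("0160", ⟨(97, 128), d3, f3, o3⟩),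
       ("0180", ⟨(129, 160), d4, f4, o4⟩),
       ("01A0", ⟨(161, 192), d5, f5, o5⟩),
       ("01C0", ⟨(193, 224), d6, f6, o6⟩)] := by
  by_cases hc : (96:Int) ≤ h
  · simp only [contStep]
    rw [if_neg (by omega : ¬((65:Int) ≤ h ∧ h < 96)), if_pos (by omega : (65:Int) < h)]
    simp only [set_pid_bit, if_neg (by norm_num : ¬((1:Int) ≤ 96 ∧ (96:Int) ≤ 32)), if_neg (by norm_num : ¬((33:Int) ≤ 96 ∧ (96:Int) ≤ 64)), if_pos (by norm_num : (65:Int) ≤ 96 ∧ (96:Int) ≤ 96)]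
    rw [show ((96:Int) - 65).toNat = 31 from by decide]
    norm_num [List.map, hc]
    repeat' apply And.intro
    all_goals (intro hx; exact absurd hx (by decide))
  · simp only [contStep]
    by_cases h1 : (65:Int) ≤ h ∧ h < 96
    · rw [if_pos h1]
      simp [hc]
    · rw [if_neg h1, if_neg (by omega : ¬((65:Int) < h))]
      simp [hc]

lemma contA_3 (h : Int) (d0 d1 d2 d3 d4 d5 d6 : List Int)
    (f0 f1 f2 f3 f4 f5 f6 : Bool) (o0 o1 o2 o3 o4 o5 o6 : Option String)
    (D : List Int) (F : Bool) (O : Option String) :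
    contStep h
      [
       ("0100", ⟨(1, 32), d0, f0, o0⟩),
       ("0120", ⟨(33, 64), d1, f1, o1⟩),
       ("0140", ⟨(65, 96), d2, f2, o2⟩),
       ("0160", ⟨(97, 128), d3, f3, o3⟩),
       ("0180", ⟨(129, 160), d4, f4, o4⟩),
       ("01A0", ⟨(161, 192), d5, f5, o5⟩),
       ("01C0", ⟨(193, 224), d6, f6, o6⟩)]
      ("0160", ⟨(97, 128), D, F, O⟩)
    = [
       ("0100", ⟨(1, 32), d0, f0, o0⟩),
       ("0120", ⟨(33, 64), d1, f1, o1⟩),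
       ("0140", ⟨(65, 96), d2, f2, o2⟩),
       ("0160", ⟨(97, 128), (if (128:Int) ≤ h then d3.set 31 1 else d3), (if (128:Int) ≤ h then true else f3), o3⟩),
       ("0180", ⟨(129, 160), d4, f4, o4⟩),
       ("01A0", ⟨(161, 192), d5, f5, o5⟩),
       ("01C0", ⟨(193, 224), d6, f6, o6⟩)] := by
  by_cases hc : (128:Int) ≤ h
  · simp only [contStep]
    rw [if_neg (by omega : ¬((97:Int) ≤ h ∧ h < 128)), if_pos (by omega : (97:Int) < h)]
    simp only [set_pid_bit, if_neg (by norm_num : ¬((1:Int) ≤ 128 ∧ (128:Int) ≤ 32)), if_neg (by norm_num : ¬((33:Int) ≤ 128 ∧ (128:Int) ≤ 64)), if_neg (by norm_num : ¬((65:Int) ≤ 128 ∧ (128:Int) ≤ 96)), if_pos (by norm_num : (97:Int) ≤ 128 ∧ (128:Int) ≤ 128)]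
    rw [show ((128:Int) - 97).toNat = 31 from by decide]
    norm_num [List.map, hc]
    repeat' apply And.intro
    all_goals (intro hx; exact absurd hx (by decide))
  · simp only [contStep]
    by_cases h1 : (97:Int) ≤ h ∧ h < 128
    · rw [if_pos h1]
      simp [hc]
    · rw [if_neg h1, if_neg (by omega : ¬((97:Int) < h))]
      simp [hc]

lemma contA_4 (h : Int) (d0 d1 d2 d3 d4 d5 d6 : List Int)
    (f0 f1 f2 f3 f4 f5 f6 : Bool) (o0 o1 o2 o3 o4 o5 o6 : Option String)
    (D : List Int) (F : Bool) (O : Option String) :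
    contStep h
      [
       ("0100", ⟨(1, 32), d0, f0, o0⟩),
       ("0120", ⟨(33, 64), d1, f1, o1⟩),
       ("0140", ⟨(65, 96), d2, f2, o2⟩),
       ("0160", ⟨(97, 128), d3, f3, o3⟩),
       ("0180", ⟨(129, 160), d4, f4, o4⟩),
       ("01A0", ⟨(161, 192), d5, f5, o5⟩),
       ("01C0", ⟨(193, 224), d6, f6, o6⟩)]
      ("0180", ⟨(129, 160), D, F, O⟩)
    = [
       ("0100", ⟨(1, 32), d0, f0, o0⟩),
       ("0120", ⟨(33, 64), d1, f1, o1⟩),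
       ("0140", ⟨(65, 96), d2, f2, o2⟩),
       ("0160", ⟨(97, 128), d3, f3, o3⟩),
       ("0180", ⟨(129, 160), (if (160:Int) ≤ h then d4.set 31 1 else d4), (if (160:Int) ≤ h then true else f4), o4⟩),
       ("01A0", ⟨(161, 192), d5, f5, o5⟩),
       ("01C0", ⟨(193, 224), d6, f6, o6⟩)] := by
  by_cases hc : (160:Int) ≤ h
  · simp only [contStep]
    rw [if_neg (by omega : ¬((129:Int) ≤ h ∧ h < 160)), if_pos (by omega : (129:Int) < h)]
    simp only [set_pid_bit, if_neg (by norm_num : ¬((1:Int) ≤ 160 ∧ (160:Int) ≤ 32)), if_neg (by norm_num : ¬((33:Int) ≤ 160 ∧ (160:Int) ≤ 64)), if_neg (by norm_num : ¬((65:Int) ≤ 160 ∧ (160:Int) ≤ 96)), if_neg (by norm_num : ¬((97:Int) ≤ 160 ∧ (160:Int) ≤ 128)), if_pos (by norm_num : (129:Int) ≤ 160 ∧ (160:Int) ≤ 160)]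
    rw [show ((160:Int) - 129).toNat = 31 from by decide]
    norm_num [List.map, hc]
    repeat' apply And.intro
    all_goals (intro hx; exact absurd hx (by decide))
  · simp only [contStep]
    by_cases h1 : (129:Int) ≤ h ∧ h < 160
    · rw [if_pos h1]
      simp [hc]
    · rw [if_neg h1, if_neg (by omega : ¬((129:Int) < h))]
      simp [hc]

lemma contA_5 (h : Int) (d0 d1 d2 d3 d4 d5 d6 : List Int)
    (f0 f1 f2 f3 f4 f5 f6 : Bool) (o0 o1 o2 o3 o4 o5 o6 : Option String)
    (D : List Int) (F : Bool) (O : Option String) :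
    contStep h
      [
       ("0100", ⟨(1, 32), d0, f0, o0⟩),
       ("0120", ⟨(33, 64), d1, f1, o1⟩),
       ("0140", ⟨(65, 96), d2, f2, o2⟩),
       ("0160", ⟨(97, 128), d3, f3, o3⟩),
       ("0180", ⟨(129, 160), d4, f4, o4⟩),
       ("01A0", ⟨(161, 192), d5, f5, o5⟩),
       ("01C0", ⟨(193, 224), d6, f6, o6⟩)]
      ("01A0", ⟨(161, 192), D, F, O⟩)
    = [
       ("0100", ⟨(1, 32), d0, f0, o0⟩),
       ("0120", ⟨(33, 64), d1, f1, o1⟩),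
       ("0140", ⟨(65, 96), d2, f2, o2⟩),
       ("0160", ⟨(97, 128), d3, f3, o3⟩),
       ("0180", ⟨(129, 160), d4, f4, o4⟩),
       ("01A0", ⟨(161, 192), (if (192:Int) ≤ h then d5.set 31 1 else d5), (if (192:Int) ≤ h then true else f5), o5⟩),
       ("01C0", ⟨(193, 224), d6, f6, o6⟩)] := by
  by_cases hc : (192:Int) ≤ h
  · simp only [contStep]
    rw [if_neg (by omega : ¬((161:Int) ≤ h ∧ h < 192)), if_pos (by omega : (161:Int) < h)]
    simp only [set_pid_bit, if_neg (by norm_num : ¬((1:Int) ≤ 192 ∧ (192:Int) ≤ 32)), if_neg (by norm_num : ¬((33:Int) ≤ 192 ∧ (192:Int) ≤ 64)), if_neg (by norm_num : ¬((65:Int) ≤ 192 ∧ (192:Int) ≤ 96)), if_neg (by norm_num : ¬((97:Int) ≤ 192 ∧ (192:Int) ≤ 128)), if_neg (by norm_num : ¬((129:Int) ≤ 192 ∧ (192:Int) ≤ 160)), if_pos (by norm_num : (161:Int) ≤ 192 ∧ (192:Int) ≤ 192)]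
    rw [show ((192:Int) - 161).toNat = 31 from by decide]
    norm_num [List.map, hc]
    repeat' apply And.intro
    all_goals (intro hx; exact absurd hx (by decide))
  · simp only [contStep]
    by_cases h1 : (161:Int) ≤ h ∧ h < 192
    · rw [if_pos h1]
      simp [hc]
    · rw [if_neg h1, if_neg (by omega : ¬((161:Int) < h))]
      simp [hc]

lemma contA_6 (h : Int) (d0 d1 d2 d3 d4 d5 d6 : List Int)
    (f0 f1 f2 f3 f4 f5 f6 : Bool) (o0 o1 o2 o3 o4 o5 o6 : Option String)
    (D : List Int) (F : Bool) (O : Option String) :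
    contStep h
      [
       ("0100", ⟨(1, 32), d0, f0, o0⟩),
       ("0120", ⟨(33, 64), d1, f1, o1⟩),
       ("0140", ⟨(65, 96), d2, f2, o2⟩),
       ("0160", ⟨(97, 128), d3, f3, o3⟩),
       ("0180", ⟨(129, 160), d4, f4, o4⟩),
       ("01A0", ⟨(161, 192), d5, f5, o5⟩),
       ("01C0", ⟨(193, 224), d6, f6, o6⟩)]
      ("01C0", ⟨(193, 224), D, F, O⟩)
    = [
       ("0100", ⟨(1, 32), d0, f0, o0⟩),
       ("0120", ⟨(33, 64), d1, f1, o1⟩),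
       ("0140", ⟨(65, 96), d2, f2, o2⟩),
       ("0160", ⟨(97, 128), d3, f3, o3⟩),
       ("0180", ⟨(129, 160), d4, f4, o4⟩),
       ("01A0", ⟨(161, 192), d5, f5, o5⟩),
       ("01C0", ⟨(193, 224), (if (224:Int) ≤ h then d6.set 31 1 else d6), (if (224:Int) ≤ h then true else f6), o6⟩)] := by
  by_cases hc : (224:Int) ≤ h
  · simp only [contStep]
    rw [if_neg (by omega : ¬((193:Int) ≤ h ∧ h < 224)), if_pos (by omega : (193:Int) < h)]
    simp only [set_pid_bit, if_neg (by norm_num : ¬((1:Int) ≤ 224 ∧ (224:Int) ≤ 32)), if_neg (by norm_num : ¬((33:Int) ≤ 224 ∧ (224:Int) ≤ 64)), if_neg (by norm_num : ¬((65:Int) ≤ 224 ∧ (224:Int) ≤ 96)), if_neg (by norm_num : ¬((97:Int) ≤ 224 ∧ (224:Int) ≤ 128)), if_neg (by norm_num : ¬((129:Int) ≤ 224 ∧ (224:Int) ≤ 160)), if_neg (by norm_num : ¬((161:Int) ≤ 224 ∧ (224:Int) ≤ 192)), if_pos (by norm_num : (193:Int) ≤ 224 ∧ (224:Int) ≤ 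224)]
    rw [show ((224:Int) - 193).toNat = 31 from by decide]
    norm_num [List.map, hc]
    repeat' apply And.intro
    all_goals (intro hx; exact absurd hx (by decide))
  · simp only [contStep]
    by_cases h1 : (193:Int) ≤ h ∧ h < 224
    · rw [if_pos h1]
      simp [hc]
    · rw [if_neg h1, if_neg (by omega : ¬((193:Int) < h))]
      simp [hc]

lemma cont_sim (h : Int) (d0 d1 d2 d3 d4 d5 d6 : List Int) :
    List.foldl (contStep h)
      [
       ("0100", ⟨(1, 32), d0, false, none⟩),
       ("0120", ⟨(33, 64), d1, false, none⟩),
       ("0140", ⟨(65, 96), d2, false, none⟩),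
       ("0160", ⟨(97, 128), d3, false, none⟩),
       ("0180", ⟨(129, 160), d4, false, none⟩),
       ("01A0", ⟨(161, 192), d5, false, none⟩),
       ("01C0", ⟨(193, 224), d6, false, none⟩)]
      [
       ("0100", ⟨(1, 32), d0, false, none⟩),
       ("0120", ⟨(33, 64), d1, false, none⟩),
       ("0140", ⟨(65, 96), d2, false, none⟩),
       ("0160", ⟨(97, 128), d3, false, none⟩),
       ("0180", ⟨(129, 160), d4, false, none⟩),
       ("01A0", ⟨(161, 192), d5, false, none⟩),
       ("01C0", ⟨(193, 224), d6, false, none⟩)]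
    = [
       ("0100", ⟨(1, 32), (if (32:Int) ≤ h then d0.set 31 1 else d0), (if (32:Int) ≤ h then true else false), none⟩),
       ("0120", ⟨(33, 64), (if (64:Int) ≤ h then d1.set 31 1 else d1), (if (64:Int) ≤ h then true else false), none⟩),
       ("0140", ⟨(65, 96), (if (96:Int) ≤ h then d2.set 31 1 else d2), (if (96:Int) ≤ h then true else false), none⟩),
       ("0160", ⟨(97, 128), (if (128:Int) ≤ h then d3.set 31 1 else d3), (if (128:Int) ≤ h then true else false), none⟩),
       ("0180", ⟨(129, 160), (if (160:Int) ≤ h then d4.set 31 1 else d4), (if (160:Int) ≤ h then true else false), none⟩),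
       ("01A0", ⟨(161, 192), (if (192:Int) ≤ h then d5.set 31 1 else d5), (if (192:Int) ≤ h then true else false), none⟩),
       ("01C0", ⟨(193, 224), (if (224:Int) ≤ h then d6.set 31 1 else d6), (if (224:Int) ≤ h then true else false), none⟩)] := by
  simp only [List.foldl_cons, List.foldl_nil]
  rw [contA_0, contA_1, contA_2, contA_3, contA_4, contA_5, contA_6]

lemma ite_tf (c : Prop) [Decidable c] : (if c then true else false) = decide c := by
  by_cases hc : c <;> simp [hc]

lemma ind_cont (base : Int) (L : List Int) (c : Prop) [Decidable c] :
    (if c then (ind base L).set 31 1 else ind base L)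
      = (List.range 32).map (fun (j : Nat) => i01 (cbits base L (decide c) j)) := by
  by_cases hc : c
  · rw [if_pos hc]
    unfold ind cbits
    apply List.ext_getElem
    · simp
    · intro j hj _
      simp only [List.length_set, List.length_map, List.length_range] at hj
      simp only [List.getElem_set, List.getElem_map, List.getElem_range]
      by_cases h31 : j = 31
      · simp [h31, hc, i01]
      · have : ¬((31 : Nat) = j) := fun hh => h31 hh.symm
        simp [this, h31, hc]
  · rw [if_neg hc]
    unfold ind cbits
    apply List.map_congr_left
    intro j hj
    simp [hc]


lemma outA_0 (d0 d1 d2 d3 d4 d5 d6 : List Int)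
    (f0 f1 f2 f3 f4 f5 f6 : Bool) (o0 o1 o2 o3 o4 o5 o6 : Option String)
    (D : List Int) (F : Bool) (O : Option String) :
    outStep
      [
       ("0100", ⟨(1, 32), d0, f0, o0⟩),
       ("0120", ⟨(33, 64), d1, f1, o1⟩),
       ("0140", ⟨(65, 96), d2, f2, o2⟩),
       ("0160", ⟨(97, 128), d3, f3, o3⟩),
       ("0180", ⟨(129, 160), d4, f4, o4⟩),
       ("01A0", ⟨(161, 192), d5, f5, o5⟩),
       ("01C0", ⟨(193, 224), d6, f6, o6⟩)]
      ("0100", ⟨(1, 32), D, F, O⟩)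
    = [
       ("0100", ⟨(1, 32), d0, f0, (if D.any (fun x => decide (x ≠ 0)) || F then some (mkLine "0100" D) else o0)⟩),
       ("0120", ⟨(33, 64), d1, f1, o1⟩),
       ("0140", ⟨(65, 96), d2, f2, o2⟩),
       ("0160", ⟨(97, 128), d3, f3, o3⟩),
       ("0180", ⟨(129, 160), d4, f4, o4⟩),
       ("01A0", ⟨(161, 192), d5, f5, o5⟩),
       ("01C0", ⟨(193, 224), d6, f6, o6⟩)] := by
  by_cases hb : (D.any (fun x => decide (x ≠ 0)) || F) = true
  · simp only [outStep]
    rw [if_pos hb, if_pos hb]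
    simp only [List.map]
    norm_num
    repeat' apply And.intro
    all_goals (intro hx; exact absurd hx (by decide))
  · simp only [outStep]
    rw [if_neg hb, if_neg hb]

lemma outA_1 (d0 d1 d2 d3 d4 d5 d6 : List Int)
    (f0 f1 f2 f3 f4 f5 f6 : Bool) (o0 o1 o2 o3 o4 o5 o6 : Option String)
    (D : List Int) (F : Bool) (O : Option String) :
    outStep
      [
       ("0100", ⟨(1, 32), d0, f0, o0⟩),
       ("0120", ⟨(33, 64), d1, f1, o1⟩),
       ("0140", ⟨(65, 96), d2, f2, o2⟩),
       ("0160", ⟨(97, 128), d3, f3, o3⟩),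
       ("0180", ⟨(129, 160), d4, f4, o4⟩),
       ("01A0", ⟨(161, 192), d5, f5, o5⟩),
       ("01C0", ⟨(193, 224), d6, f6, o6⟩)]
      ("0120", ⟨(33, 64), D, F, O⟩)
    = [
       ("0100", ⟨(1, 32), d0, f0, o0⟩),
       ("0120", ⟨(33, 64), d1, f1, (if D.any (fun x => decide (x ≠ 0)) || F then some (mkLine "0120" D) else o1)⟩),
       ("0140", ⟨(65, 96), d2, f2, o2⟩),
       ("0160", ⟨(97, 128), d3, f3, o3⟩),
       ("0180", ⟨(129, 160), d4, f4, o4⟩),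
       ("01A0", ⟨(161, 192), d5, f5, o5⟩),
       ("01C0", ⟨(193, 224), d6, f6, o6⟩)] := by
  by_cases hb : (D.any (fun x => decide (x ≠ 0)) || F) = true
  · simp only [outStep]
    rw [if_pos hb, if_pos hb]
    simp only [List.map]
    norm_num
    repeat' apply And.intro
    all_goals (intro hx; exact absurd hx (by decide))
  · simp only [outStep]
    rw [if_neg hb, if_neg hb]

lemma outA_2 (d0 d1 d2 d3 d4 d5 d6 : List Int)
    (f0 f1 f2 f3 f4 f5 f6 : Bool) (o0 o1 o2 o3 o4 o5 o6 : Option String)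
    (D : List Int) (F : Bool) (O : Option String) :
    outStep
      [
       ("0100", ⟨(1, 32), d0, f0, o0⟩),
       ("0120", ⟨(33, 64), d1, f1, o1⟩),
       ("0140", ⟨(65, 96), d2, f2, o2⟩),
       ("0160", ⟨(97, 128), d3, f3, o3⟩),
       ("0180", ⟨(129, 160), d4, f4, o4⟩),
       ("01A0", ⟨(161, 192), d5, f5, o5⟩),
       ("01C0", ⟨(193, 224), d6, f6, o6⟩)]
      ("0140", ⟨(65, 96), D, F, O⟩)
    = [
       ("0100", ⟨(1, 32), d0, f0, o0⟩),
       ("0120", ⟨(33, 64), d1, f1, o1⟩),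
       ("0140", ⟨(65, 96), d2, f2, (if D.any (fun x => decide (x ≠ 0)) || F then some (mkLine "0140" D) else o2)⟩),
       ("0160", ⟨(97, 128), d3, f3, o3⟩),
       ("0180", ⟨(129, 160), d4, f4, o4⟩),
       ("01A0", ⟨(161, 192), d5, f5, o5⟩),
       ("01C0", ⟨(193, 224), d6, f6, o6⟩)] := by
  by_cases hb : (D.any (fun x => decide (x ≠ 0)) || F) = true
  · simp only [outStep]
    rw [if_pos hb, if_pos hb]
    simp only [List.map]
    norm_num
    repeat' apply And.intro
    all_goals (intro hx; exact absurd hx (by decide))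
  · simp only [outStep]
    rw [if_neg hb, if_neg hb]

lemma outA_3 (d0 d1 d2 d3 d4 d5 d6 : List Int)
    (f0 f1 f2 f3 f4 f5 f6 : Bool) (o0 o1 o2 o3 o4 o5 o6 : Option String)
    (D : List Int) (F : Bool) (O : Option String) :
    outStep
      [
       ("0100", ⟨(1, 32), d0, f0, o0⟩),
       ("0120", ⟨(33, 64), d1, f1, o1⟩),
       ("0140", ⟨(65, 96), d2, f2, o2⟩),
       ("0160", ⟨(97, 128), d3, f3, o3⟩),
       ("0180", ⟨(129, 160), d4, f4, o4⟩),
       ("01A0", ⟨(161, 192), d5, f5, o5⟩),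
       ("01C0", ⟨(193, 224), d6, f6, o6⟩)]
      ("0160", ⟨(97, 128), D, F, O⟩)
    = [
       ("0100", ⟨(1, 32), d0, f0, o0⟩),
       ("0120", ⟨(33, 64), d1, f1, o1⟩),
       ("0140", ⟨(65, 96), d2, f2, o2⟩),
       ("0160", ⟨(97, 128), d3, f3, (if D.any (fun x => decide (x ≠ 0)) || F then some (mkLine "0160" D) else o3)⟩),
       ("0180", ⟨(129, 160), d4, f4, o4⟩),
       ("01A0", ⟨(161, 192), d5, f5, o5⟩),
       ("01C0", ⟨(193, 224), d6, f6, o6⟩)] := by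
  by_cases hb : (D.any (fun x => decide (x ≠ 0)) || F) = true
  · simp only [outStep]
    rw [if_pos hb, if_pos hb]
    simp only [List.map]
    norm_num
    repeat' apply And.intro
    all_goals (intro hx; exact absurd hx (by decide))
  · simp only [outStep]
    rw [if_neg hb, if_neg hb]

lemma outA_4 (d0 d1 d2 d3 d4 d5 d6 : List Int)
    (f0 f1 f2 f3 f4 f5 f6 : Bool) (o0 o1 o2 o3 o4 o5 o6 : Option String)
    (D : List Int) (F : Bool) (O : Option String) :
    outStep
      [
       ("0100", ⟨(1, 32), d0, f0, o0⟩),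
       ("0120", ⟨(33, 64), d1, f1, o1⟩),
       ("0140", ⟨(65, 96), d2, f2, o2⟩),
       ("0160", ⟨(97, 128), d3, f3, o3⟩),
       ("0180", ⟨(129, 160), d4, f4, o4⟩),
       ("01A0", ⟨(161, 192), d5, f5, o5⟩),
       ("01C0", ⟨(193, 224), d6, f6, o6⟩)]
      ("0180", ⟨(129, 160), D, F, O⟩)
    = [
       ("0100", ⟨(1, 32), d0, f0, o0⟩),
       ("0120", ⟨(33, 64), d1, f1, o1⟩),
       ("0140", ⟨(65, 96), d2, f2, o2⟩),
       ("0160", ⟨(97, 128), d3, f3, o3⟩),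
       ("0180", ⟨(129, 160), d4, f4, (if D.any (fun x => decide (x ≠ 0)) || F then some (mkLine "0180" D) else o4)⟩),
       ("01A0", ⟨(161, 192), d5, f5, o5⟩),
       ("01C0", ⟨(193, 224), d6, f6, o6⟩)] := by
  by_cases hb : (D.any (fun x => decide (x ≠ 0)) || F) = true
  · simp only [outStep]
    rw [if_pos hb, if_pos hb]
    simp only [List.map]
    norm_num
    repeat' apply And.intro
    all_goals (intro hx; exact absurd hx (by decide))
  · simp only [outStep]
    rw [if_neg hb, if_neg hb]

lemma outA_5 (d0 d1 d2 d3 d4 d5 d6 : List Int)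
    (f0 f1 f2 f3 f4 f5 f6 : Bool) (o0 o1 o2 o3 o4 o5 o6 : Option String)
    (D : List Int) (F : Bool) (O : Option String) :
    outStep
      [
       ("0100", ⟨(1, 32), d0, f0, o0⟩),
       ("0120", ⟨(33, 64), d1, f1, o1⟩),
       ("0140", ⟨(65, 96), d2, f2, o2⟩),
       ("0160", ⟨(97, 128), d3, f3, o3⟩),
       ("0180", ⟨(129, 160), d4, f4, o4⟩),
       ("01A0", ⟨(161, 192), d5, f5, o5⟩),
       ("01C0", ⟨(193, 224), d6, f6, o6⟩)]
      ("01A0", ⟨(161, 192), D, F, O⟩)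
    = [
       ("0100", ⟨(1, 32), d0, f0, o0⟩),
       ("0120", ⟨(33, 64), d1, f1, o1⟩),
       ("0140", ⟨(65, 96), d2, f2, o2⟩),
       ("0160", ⟨(97, 128), d3, f3, o3⟩),
       ("0180", ⟨(129, 160), d4, f4, o4⟩),
       ("01A0", ⟨(161, 192), d5, f5, (if D.any (fun x => decide (x ≠ 0)) || F then some (mkLine "01A0" D) else o5)⟩),
       ("01C0", ⟨(193, 224), d6, f6, o6⟩)] := by
  by_cases hb : (D.any (fun x => decide (x ≠ 0)) || F) = true
  · simp only [outStep]
    rw [if_pos hb, if_pos hb]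
    simp only [List.map]
    norm_num
    repeat' apply And.intro
    all_goals (intro hx; exact absurd hx (by decide))
  · simp only [outStep]
    rw [if_neg hb, if_neg hb]

lemma outA_6 (d0 d1 d2 d3 d4 d5 d6 : List Int)
    (f0 f1 f2 f3 f4 f5 f6 : Bool) (o0 o1 o2 o3 o4 o5 o6 : Option String)
    (D : List Int) (F : Bool) (O : Option String) :
    outStep
      [
       ("0100", ⟨(1, 32), d0, f0, o0⟩),
       ("0120", ⟨(33, 64), d1, f1, o1⟩),
       ("0140", ⟨(65, 96), d2, f2, o2⟩),
       ("0160", ⟨(97, 128), d3, f3, o3⟩),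
       ("0180", ⟨(129, 160), d4, f4, o4⟩),
       ("01A0", ⟨(161, 192), d5, f5, o5⟩),
       ("01C0", ⟨(193, 224), d6, f6, o6⟩)]
      ("01C0", ⟨(193, 224), D, F, O⟩)
    = [
       ("0100", ⟨(1, 32), d0, f0, o0⟩),
       ("0120", ⟨(33, 64), d1, f1, o1⟩),
       ("0140", ⟨(65, 96), d2, f2, o2⟩),
       ("0160", ⟨(97, 128), d3, f3, o3⟩),
       ("0180", ⟨(129, 160), d4, f4, o4⟩),
       ("01A0", ⟨(161, 192), d5, f5, o5⟩),
       ("01C0", ⟨(193, 224), d6, f6, (if D.any (fun x => decide (x ≠ 0)) || F then some (mkLine "01C0" D) else o6)⟩)] := by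
  by_cases hb : (D.any (fun x => decide (x ≠ 0)) || F) = true
  · simp only [outStep]
    rw [if_pos hb, if_pos hb]
    simp only [List.map]
    norm_num
    repeat' apply And.intro
    all_goals (intro hx; exact absurd hx (by decide))
  · simp only [outStep]
    rw [if_neg hb, if_neg hb]

lemma out_sim (y0 y1 y2 y3 y4 y5 y6 : List Int) (g0 g1 g2 g3 g4 g5 g6 : Bool) :
    List.foldl outStep
      [
       ("0100", ⟨(1, 32), y0, g0, none⟩),
       ("0120", ⟨(33, 64), y1, g1, none⟩),
       ("0140", ⟨(65, 96), y2, g2, none⟩),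
       ("0160", ⟨(97, 128), y3, g3, none⟩),
       ("0180", ⟨(129, 160), y4, g4, none⟩),
       ("01A0", ⟨(161, 192), y5, g5, none⟩),
       ("01C0", ⟨(193, 224), y6, g6, none⟩)]
      [
       ("0100", ⟨(1, 32), y0, g0, none⟩),
       ("0120", ⟨(33, 64), y1, g1, none⟩),
       ("0140", ⟨(65, 96), y2, g2, none⟩),
       ("0160", ⟨(97, 128), y3, g3, none⟩),
       ("0180", ⟨(129, 160), y4, g4, none⟩),
       ("01A0", ⟨(161, 192), y5, g5, none⟩),
       ("01C0", ⟨(193, 224), y6, g6, none⟩)]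
    = [
       ("0100", ⟨(1, 32), y0, g0, (if y0.any (fun x => decide (x ≠ 0)) || g0 then some (mkLine "0100" y0) else none)⟩),
       ("0120", ⟨(33, 64), y1, g1, (if y1.any (fun x => decide (x ≠ 0)) || g1 then some (mkLine "0120" y1) else none)⟩),
       ("0140", ⟨(65, 96), y2, g2, (if y2.any (fun x => decide (x ≠ 0)) || g2 then some (mkLine "0140" y2) else none)⟩),
       ("0160", ⟨(97, 128), y3, g3, (if y3.any (fun x => decide (x ≠ 0)) || g3 then some (mkLine "0160" y3) else none)⟩),
       ("0180", ⟨(129, 160), y4, g4, (if y4.any (fun x => decide (x ≠ 0)) || g4 then some (mkLine "0180" y4) else none)⟩),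
       ("01A0", ⟨(161, 192), y5, g5, (if y5.any (fun x => decide (x ≠ 0)) || g5 then some (mkLine "01A0" y5) else none)⟩),
       ("01C0", ⟨(193, 224), y6, g6, (if y6.any (fun x => decide (x ≠ 0)) || g6 then some (mkLine "01C0" y6) else none)⟩)] := by
  simp only [List.foldl_cons, List.foldl_nil]
  rw [outA_0, outA_1, outA_2, outA_3, outA_4, outA_5, outA_6]

lemma filterMap_out_cons (c : Prop) [Decidable c] (v : String) (L : String) (R : Int × Int)
    (D : List Int) (F : Bool) (rest : List (String × PidInfo)) :
    List.filterMap (fun e => e.2.output)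
        (((L, ⟨R, D, F, if c then some v else none⟩) : String × PidInfo) :: rest)
      = (if c then [v] else []) ++ List.filterMap (fun e => e.2.output) rest := by
  by_cases hc : c <;> simp [hc]


lemma padHex_digits : ∀ (w : Nat), 1 ≤ w → ∀ m, m < 16 ^ w →
    pyHexPad w m = (List.range w).map (fun i => pyHexDig (m / 16 ^ (w - 1 - i) % 16)) := by
  intro w
  induction w with
  | zero => omega
  | succ w ih =>
    intro _ m hm
    by_cases hw : w = 0
    · subst hw
      have h16 : m < 16 := by norm_num at hm; omega
      rw [pyHexPad, pyHexChars, dif_pos h16]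
      simp [Nat.mod_eq_of_lt h16]
    · by_cases hsm : m < 16
      · rw [pyHexPad, pyHexChars, dif_pos hsm]
        rw [show List.range (w+1) = List.range w ++ [w] from by rw [List.range_succ]]
        rw [List.map_append]
        have hz : ∀ i ∈ List.range w, pyHexDig (m / 16 ^ (w - i) % 16) = '0' := by
          intro i hi
          rw [List.mem_range] at hi
          have : m / 16 ^ (w - i) = 0 := by
            apply Nat.div_eq_of_lt
            calc m < 16 := hsm
              _ ≤ 16 ^ (w - i) := Nat.le_self_pow (by omega) 16
          rw [this]; rfl
        have : (List.range w).map (fun i => pyHexDig (m / 16 ^ (w + 1 - 1 - i) % 16)) = List.replicate w '0' := by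
          rw [List.eq_replicate_iff]
          constructor
          · simp
          · intro c hc
            rw [List.mem_map] at hc
            obtain ⟨i, hi, hci⟩ := hc
            rw [← hci]
            have := hz i hi
            simpa [show w + 1 - 1 - i = w - i from by omega] using this
        rw [this]
        simp [Nat.mod_eq_of_lt hsm]
      · -- 16 ≤ m
        rw [pyHexPad, pyHexChars, dif_neg hsm]
        have hdiv : m / 16 < 16 ^ w := by
          rw [Nat.div_lt_iff_lt_mul (by omega)]
          calc m < 16 ^ (w+1) := hm
            _ = 16 ^ w * 16 := by ring
        have ihh := ih (by omega) (m / 16) hdiv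
        rw [pyHexPad] at ihh
        rw [show (pyHexChars (m / 16) ++ [pyHexDig (m % 16)]).length = (pyHexChars (m/16)).length + 1 from by simp]
        rw [show w + 1 - ((pyHexChars (m/16)).length + 1) = w - (pyHexChars (m/16)).length from by omega]
        rw [List.range_succ, List.map_append]
        have hmap : (List.range w).map (fun i => pyHexDig (m / 16 ^ (w + 1 - 1 - i) % 16)) =
            (List.range w).map (fun i => pyHexDig (m / 16 / 16 ^ (w - 1 - i) % 16)) := by
          apply List.map_congr_left
          intro i hi
          rw [List.mem_range] at hi
          have e : m / 16 ^ (w + 1 - 1 - i) = m / 16 / 16 ^ (w - 1 - i) := by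
            rw [Nat.div_div_eq_div_mul, ← pow_succ', show w - 1 - i + 1 = w + 1 - 1 - i from by omega]
          rw [e]
        rw [hmap, ← ihh, ← List.append_assoc]
        simp

lemma p2_digits (v : Nat) (hv : v < 256) :
    pyHexPad 2 v = [pyHexDig (v / 16 % 16), pyHexDig (v % 16)] := by
  rw [padHex_digits 2 (by norm_num) v (by norm_num; omega)]
  rw [show List.range 2 = [0, 1] from by decide]
  norm_num

lemma join_nil4 (a1 a2 b1 b2 c1 c2 d1 d2 : Char) :
    PySem.Chars.join [] [[a1,a2],[b1,b2],[c1,c2],[d1,d2]] = [a1,a2,b1,b2,c1,c2,d1,d2] := by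
  simp [PySem.Chars.join, List.intercalate, List.intersperse]

lemma join_sp4 (p q r s : List Char) :
    PySem.Chars.join [' '] [p, q, r, s] = p ++ ' ' :: (q ++ ' ' :: (r ++ ' ' :: s)) := by
  simp [PySem.Chars.join, List.intercalate, List.intersperse]

lemma slA0 (c0 c1 c2 c3 c4 c5 c6 c7 : Char) :
    PySem.List.slice [c0,c1,c2,c3,c4,c5,c6,c7] (some 0) (some (0+2)) = [c0,c1] := rfl
lemma slA2 (c0 c1 c2 c3 c4 c5 c6 c7 : Char) :
    PySem.List.slice [c0,c1,c2,c3,c4,c5,c6,c7] (some 2) (some (2+2)) = [c2,c3] := rfl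
lemma slA4 (c0 c1 c2 c3 c4 c5 c6 c7 : Char) :
    PySem.List.slice [c0,c1,c2,c3,c4,c5,c6,c7] (some 4) (some (4+2)) = [c4,c5] := rfl
lemma slA6 (c0 c1 c2 c3 c4 c5 c6 c7 : Char) :
    PySem.List.slice [c0,c1,c2,c3,c4,c5,c6,c7] (some 6) (some (6+2)) = [c6,c7] := rfl

lemma i01_ne (b : Bool) : decide (i01 b ≠ 0) = b := by cases b <;> rfl


lemma val8_lt (x0 x1 x2 x3 x4 x5 x6 x7 : Bool) : val8 x0 x1 x2 x3 x4 x5 x6 x7 < 256 := by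
  unfold val8
  cases x0 <;> cases x1 <;> cases x2 <;> cases x3 <;> cases x4 <;> cases x5 <;> cases x6 <;> cases x7 <;> decide

lemma val8_ne (x0 x1 x2 x3 x4 x5 x6 x7 : Bool) :
    decide (val8 x0 x1 x2 x3 x4 x5 x6 x7 ≠ 0) = (x0 || (x1 || (x2 || (x3 || (x4 || (x5 || (x6 || x7))))))) := by
  unfold val8
  cases x0 <;> cases x1 <;> cases x2 <;> cases x3 <;> cases x4 <;> cases x5 <;> cases x6 <;> cases x7 <;> decide

lemma chunk8_eq (x0 x1 x2 x3 x4 x5 x6 x7 : Bool) :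
    chunkVal [i01 x0, i01 x1, i01 x2, i01 x3, i01 x4, i01 x5, i01 x6, i01 x7] = val8 x0 x1 x2 x3 x4 x5 x6 x7 := by
  unfold chunkVal val8 i01
  cases x0 <;> cases x1 <;> cases x2 <;> cases x3 <;> cases x4 <;> cases x5 <;> cases x6 <;> cases x7 <;> decide

lemma fold8_eq (g : Nat → Bool) :
    (List.range 8).foldl (fun (a : Nat) (i : Nat) => if g i then a + ((128 : Nat) >>> i) else a) (0 : Nat)
      = val8 (g 0) (g 1) (g 2) (g 3) (g 4) (g 5) (g 6) (g 7) := by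
  have hf : (fun (a : Nat) (i : Nat) => if g i then a + ((128 : Nat) >>> i) else a)
      = (fun (a : Nat) (i : Nat) => a + (if g i then ((128 : Nat) >>> i) else 0)) := by
    funext a i
    by_cases h : g i <;> simp [h]
  rw [hf, show List.range 8 = [0,1,2,3,4,5,6,7] from rfl]
  simp only [List.foldl_cons, List.foldl_nil]
  unfold val8
  rw [show (128 : Nat) >>> 1 = 64 from rfl, show (128 : Nat) >>> 2 = 32 from rfl,
      show (128 : Nat) >>> 3 = 16 from rfl, show (128 : Nat) >>> 4 = 8 from rfl,
      show (128 : Nat) >>> 5 = 4 from rfl, show (128 : Nat) >>> 6 = 2 from rfl,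
      show (128 : Nat) >>> 7 = 1 from rfl]
  norm_num


lemma bath32 (x0 x1 x2 x3 x4 x5 x6 x7 x8 x9 x10 x11 x12 x13 x14 x15 x16 x17 x18 x19 x20 x21 x22 x23 x24 x25 x26 x27 x28 x29 x30 x31 : Bool) :
    binary_array_to_hex [i01 x0, i01 x1, i01 x2, i01 x3, i01 x4, i01 x5, i01 x6, i01 x7, i01 x8, i01 x9, i01 x10, i01 x11, i01 x12, i01 x13, i01 x14, i01 x15, i01 x16, i01 x17, i01 x18, i01 x19, i01 x20, i01 x21, i01 x22, i01 x23, i01 x24, i01 x25, i01 x26, i01 x27, i01 x28, i01 x29, i01 x30, i01 x31]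
      = PySem.Chars.join [' '] [pyHexPad 2 (val8 x0 x1 x2 x3 x4 x5 x6 x7), pyHexPad 2 (val8 x8 x9 x10 x11 x12 x13 x14 x15),
          pyHexPad 2 (val8 x16 x17 x18 x19 x20 x21 x22 x23), pyHexPad 2 (val8 x24 x25 x26 x27 x28 x29 x30 x31)] := by
  unfold binary_array_to_hex
  rw [show PySem.List.pyRange 0 32 8 = [0, 8, 16, 24] from by decide]
  simp only [List.map]
  rw [show PySem.List.slice [i01 x0, i01 x1, i01 x2, i01 x3, i01 x4, i01 x5, i01 x6, i01 x7, i01 x8, i01 x9, i01 x10, i01 x11, i01 x12, i01 x13, i01 x14, i01 x15, i01 x16, i01 x17, i01 x18, i01 x19, i01 x20, i01 x21, i01 x22, i01 x23, i01 x24, i01 x25, i01 x26, i01 x27, i01 x28, i01 x29, i01 x30, i01 x31] (some 0) (some (0+8)) = [i01 x0, i01 x1, i01 x2, i01 x3, i01 x4, i01 x5, i01 x6, i01 x7] from rfl,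
      show PySem.List.slice [i01 x0, i01 x1, i01 x2, i01 x3, i01 x4, i01 x5, i01 x6, i01 x7, i01 x8, i01 x9, i01 x10, i01 x11, i01 x12, i01 x13, i01 x14, i01 x15, i01 x16, i01 x17, i01 x18, i01 x19, i01 x20, i01 x21, i01 x22, i01 x23, i01 x24, i01 x25, i01 x26, i01 x27, i01 x28, i01 x29, i01 x30, i01 x31] (some 8) (some (8+8)) = [i01 x8, i01 x9, i01 x10, i01 x11, i01 x12, i01 x13, i01 x14, i01 x15] from rfl,
      show PySem.List.slice [i01 x0, i01 x1, i01 x2, i01 x3, i01 x4, i01 x5, i01 x6, i01 x7, i01 x8, i01 x9, i01 x10, i01 x11, i01 x12, i01 x13, i01 x14, i01 x15, i01 x16, i01 x17, i01 x18, i01 x19, i01 x20, i01 x21, i01 x22, i01 x23, i01 x24, i01 x25, i01 x26, i01 x27, i01 x28, i01 x29, i01 x30, i01 x31] (some 16) (some (16+8)) = [i01 x16, i01 x17, i01 x18, i01 x19, i01 x20, i01 x21, i01 x22, i01 x23] from rfl,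
      show PySem.List.slice [i01 x0, i01 x1, i01 x2, i01 x3, i01 x4, i01 x5, i01 x6, i01 x7, i01 x8, i01 x9, i01 x10, i01 x11, i01 x12, i01 x13, i01 x14, i01 x15, i01 x16, i01 x17, i01 x18, i01 x19, i01 x20, i01 x21, i01 x22, i01 x23, i01 x24, i01 x25, i01 x26, i01 x27, i01 x28, i01 x29, i01 x30, i01 x31] (some 24) (some (24+8)) = [i01 x24, i01 x25, i01 x26, i01 x27, i01 x28, i01 x29, i01 x30, i01 x31] from rfl]
  rw [chunk8_eq, chunk8_eq, chunk8_eq, chunk8_eq]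
  rw [p2_digits _ (val8_lt x0 x1 x2 x3 x4 x5 x6 x7), p2_digits _ (val8_lt x8 x9 x10 x11 x12 x13 x14 x15),
      p2_digits _ (val8_lt x16 x17 x18 x19 x20 x21 x22 x23), p2_digits _ (val8_lt x24 x25 x26 x27 x28 x29 x30 x31)]
  rw [join_nil4]
  rw [show ((List.length [pyHexDig (val8 x0 x1 x2 x3 x4 x5 x6 x7 / 16 % 16), pyHexDig (val8 x0 x1 x2 x3 x4 x5 x6 x7 % 16),
      pyHexDig (val8 x8 x9 x10 x11 x12 x13 x14 x15 / 16 % 16), pyHexDig (val8 x8 x9 x10 x11 x12 x13 x14 x15 % 16),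
      pyHexDig (val8 x16 x17 x18 x19 x20 x21 x22 x23 / 16 % 16), pyHexDig (val8 x16 x17 x18 x19 x20 x21 x22 x23 % 16),
      pyHexDig (val8 x24 x25 x26 x27 x28 x29 x30 x31 / 16 % 16), pyHexDig (val8 x24 x25 x26 x27 x28 x29 x30 x31 % 16)] : Int)) = (8 : Int) from by simp]
  rw [show PySem.List.pyRange 0 8 2 = [0, 2, 4, 6] from by decide]
  simp only [List.map]
  rw [slA0, slA2, slA4, slA6, join_sp4]


lemma val8_true_ne (a b c d e f g : Bool) : val8 a b c d e f g true ≠ 0 := by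
  unfold val8
  cases a <;> cases b <;> cases c <;> cases d <;> cases e <;> cases f <;> cases g <;> decide

lemma blk_final (label : String)
    (z0 z1 z2 z3 z4 z5 z6 z7 z8 z9 z10 z11 z12 z13 z14 z15 z16 z17 z18 z19 z20 z21 z22 z23 z24 z25 z26 z27 z28 z29 z30 z31 c : Bool)
    (hc : c = true → z31 = true) :
    (if (([i01 z0, i01 z1, i01 z2, i01 z3, i01 z4, i01 z5, i01 z6, i01 z7, i01 z8, i01 z9, i01 z10, i01 z11, i01 z12, i01 z13, i01 z14, i01 z15, i01 z16, i01 z17, i01 z18, i01 z19, i01 z20, i01 z21, i01 z22, i01 z23, i01 z24, i01 z25, i01 z26, i01 z27, i01 z28, i01 z29, i01 z30, i01 z31].any fun x => decide (x ≠ 0)) || c) = true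
     then [mkLine label [i01 z0, i01 z1, i01 z2, i01 z3, i01 z4, i01 z5, i01 z6, i01 z7, i01 z8, i01 z9, i01 z10, i01 z11, i01 z12, i01 z13, i01 z14, i01 z15, i01 z16, i01 z17, i01 z18, i01 z19, i01 z20, i01 z21, i01 z22, i01 z23, i01 z24, i01 z25, i01 z26, i01 z27, i01 z28, i01 z29, i01 z30, i01 z31]] else [])
    = if ([val8 z0 z1 z2 z3 z4 z5 z6 z7, val8 z8 z9 z10 z11 z12 z13 z14 z15, val8 z16 z17 z18 z19 z20 z21 z22 z23, val8 z24 z25 z26 z27 z28 z29 z30 z31].any fun v => decide (v ≠ 0)) = true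
      then [String.ofList (label.toList ++ ':' :: '\n' :: '4' :: '1' :: ' ' ::
        (PySem.List.slice label.toList (some 2) none ++ ' ' ::
          PySem.Chars.join [' '] [pyHexPad 2 (val8 z0 z1 z2 z3 z4 z5 z6 z7), pyHexPad 2 (val8 z8 z9 z10 z11 z12 z13 z14 z15), pyHexPad 2 (val8 z16 z17 z18 z19 z20 z21 z22 z23), pyHexPad 2 (val8 z24 z25 z26 z27 z28 z29 z30 z31)]))]
      else [] := by
  have hcond : (([i01 z0, i01 z1, i01 z2, i01 z3, i01 z4, i01 z5, i01 z6, i01 z7, i01 z8, i01 z9, i01 z10, i01 z11, i01 z12, i01 z13, i01 z14, i01 z15, i01 z16, i01 z17, i01 z18, i01 z19, i01 z20, i01 z21, i01 z22, i01 z23, i01 z24, i01 z25, i01 z26, i01 z27, i01 z28, i01 z29, i01 z30, i01 z31].any fun x => decide (x ≠ 0)) || c)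
      = ([val8 z0 z1 z2 z3 z4 z5 z6 z7, val8 z8 z9 z10 z11 z12 z13 z14 z15, val8 z16 z17 z18 z19 z20 z21 z22 z23, val8 z24 z25 z26 z27 z28 z29 z30 z31].any fun v => decide (v ≠ 0)) := by
    cases hcc : c
    · simp only [List.any_cons, List.any_nil, i01_ne, val8_ne, Bool.or_false, Bool.or_assoc]
    · have h31 := hc hcc
      simp only [h31, List.any_cons, List.any_nil]
      simp
      exact Or.inr (Or.inr (Or.inr (val8_true_ne z24 z25 z26 z27 z28 z29 z30)))
  rw [hcond]
  by_cases hC : ([val8 z0 z1 z2 z3 z4 z5 z6 z7, val8 z8 z9 z10 z11 z12 z13 z14 z15, val8 z16 z17 z18 z19 z20 z21 z22 z23, val8 z24 z25 z26 z27 z28 z29 z30 z31].any fun v => decide (v ≠ 0)) = true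
  · rw [if_pos hC, if_pos hC]
    unfold mkLine
    rw [bath32]
  · rw [if_neg hC, if_neg hC]


set_option maxHeartbeats 4000000 in
lemma A_block (b base : Int) (hbase : base = 32 * b) (label : String) (L : List Int) (c : Bool) :
    (if ((List.range 32).map (fun (j : Nat) => i01 (cbits base L c j))).any (fun x => decide (x ≠ 0)) || c
     then [mkLine label ((List.range 32).map (fun (j : Nat) => i01 (cbits base L c j)))] else [])
    = blkC b label L c := by
  subst hbase
  unfold blkC bValsC
  rw [show List.range 4 = [0,1,2,3] from rfl]
  simp only [List.map]
  rw [fold8_eq, fold8_eq, fold8_eq, fold8_eq]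
  rw [show List.range 32 = [0,1,2,3,4,5,6,7,8,9,10,11,12,13,14,15,16,17,18,19,20,21,22,23,24,25,26,27,28,29,30,31] from rfl]
  simp only [List.map, cbits]
  simp only [Nat.cast_ofNat, Nat.cast_one, Nat.cast_zero]
  ring_nf
  apply blk_final
  intro h
  simp [h]


lemma max_ofList (L : List Int) (v : Int)
    (h : PySem.List.max? L (fun x => x) = some v) :
    PySem.List.max? (PySem.Set.ofList L) (fun x => x) = some v := by
  have hvL : v ∈ L := PySem.List.max?_mem h
  cases hm : PySem.List.max? (PySem.Set.ofList L) (fun x => x) with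
  | none =>
    rw [PySem.List.max?_eq_none_iff] at hm
    have : v ∈ PySem.Set.ofList L := (PySem.Set.mem_ofList _ _).mpr hvL
    rw [hm] at this
    exact absurd this List.not_mem_nil
  | some w =>
    have hwL : w ∈ L := (PySem.Set.mem_ofList _ _).mp (PySem.List.max?_mem hm)
    have h1 : w ≤ v := PySem.List.max?_isMax h w hwL
    have h2 : v ≤ w := PySem.List.max?_isMax hm v ((PySem.Set.mem_ofList _ _).mpr hvL)
    rw [le_antisymm h1 h2]

lemma B_step (b : Int) (label : String) (L : List Int) (c : Bool) (out : List String) :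
    (if ((List.range 4).map (fun (k : Nat) =>
          (List.range 8).foldl (fun (a : Nat) (i : Nat) =>
            if (decide ((32 * b + 8 * (k : Int) + (i : Int) + 1) ∈ L) || (c && decide (8 * k + i = 31)))
            then a + ((128 : Nat) >>> i) else a) (0 : Nat))).any (fun v => decide (v ≠ 0))
     then out ++ [String.ofList (label.toList ++ ':' :: '\n' :: '4' :: '1' :: ' ' ::
       (PySem.List.slice label.toList (some 2) none ++ ' ' ::
         PySem.Chars.join [' '] (((List.range 4).map (fun (k : Nat) =>
           (List.range 8).foldl (fun (a : Nat) (i : Nat) =>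
             if (decide ((32 * b + 8 * (k : Int) + (i : Int) + 1) ∈ L) || (c && decide (8 * k + i = 31)))
             then a + ((128 : Nat) >>> i) else a) (0 : Nat))).map (fun v => pyHexPad 2 v))))]
     else out)
    = out ++ blkC b label L c := by
  show (if (bValsC b L c).any (fun v => decide (v ≠ 0))
     then out ++ [String.ofList (label.toList ++ ':' :: '\n' :: '4' :: '1' :: ' ' ::
       (PySem.List.slice label.toList (some 2) none ++ ' ' ::
         PySem.Chars.join [' '] ((bValsC b L c).map (fun v => pyHexPad 2 v))))]
     else out) = out ++ blkC b label L c
  unfold blkC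
  by_cases h : (bValsC b L c).any (fun v => decide (v ≠ 0)) = true
  · rw [if_pos h, if_pos h]
  · rw [if_neg h, if_neg h]
    simp


-- ===== VERDICT (by name: the statement is the Claim_ definition above) =====
set_option maxHeartbeats 4000000 in
theorem process_pids_spec : Claim_equal_process_pids := by
  intro input hDom hPre
  obtain ⟨hAll, s0, hs0, hb0⟩ := hPre
  show process_pids input = process_pids_alt input
  have h1 : ((input.filter (fun s =>
        decide (1 ≤ (PySem.Int.ofStrBase? s 16).getD 0 ∧ (PySem.Int.ofStrBase? s 16).getD 0 ≤ 0xE0))).map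
        (fun s => (PySem.Int.ofStrBase? s 16).getD 0))
      = (input.map (fun h => (PySem.Int.ofStrBase? h 16).getD 0)).filter
          (fun p => decide (1 ≤ p ∧ p ≤ 0xE0)) := by
    rw [List.filter_map]
    rfl
  have hq : ∀ q ∈ (input.map (fun h => (PySem.Int.ofStrBase? h 16).getD 0)).filter
      (fun p => decide (1 ≤ p ∧ p ≤ 0xE0)), 1 ≤ q ∧ q ≤ 224 := by
    intro q hqm
    have := (List.mem_filter.mp hqm).2
    simpa using this
  have hne : (PySem.Int.ofStrBase? s0 16).getD 0 ∈ (input.map (fun h => (PySem.Int.ofStrBase? h 16).getD 0)).filter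
      (fun p => decide (1 ≤ p ∧ p ≤ 0xE0)) :=
    List.mem_filter.mpr ⟨List.mem_map_of_mem hs0, by simpa using hb0⟩
  obtain ⟨hv, hmax⟩ : ∃ hv, PySem.List.max? ((input.map (fun h => (PySem.Int.ofStrBase? h 16).getD 0)).filter
      (fun p => decide (1 ≤ p ∧ p ≤ 0xE0))) (fun x => x) = some hv := by
    cases hmx : PySem.List.max? ((input.map (fun h => (PySem.Int.ofStrBase? h 16).getD 0)).filter
        (fun p => decide (1 ≤ p ∧ p ≤ 0xE0))) (fun x => x) with
    | none =>
      rw [PySem.List.max?_eq_none_iff] at hmx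
      rw [hmx] at hne
      exact absurd hne (List.not_mem_nil)
    | some v => exact ⟨v, rfl⟩
  -- A side
  simp only [process_pids]
  rw [h1, hmax, Option.getD_some]
  rw [PySem.List.foldl_ite_eq_foldl_filter
        (p := fun s => 1 ≤ (PySem.Int.ofStrBase? s 16).getD 0 ∧ (PySem.Int.ofStrBase? s 16).getD 0 ≤ 0xE0)
        (f := fun st s => set_pid_bit st ((PySem.Int.ofStrBase? s 16).getD 0))]
  rw [← List.foldl_map (f := fun s => (PySem.Int.ofStrBase? s 16).getD 0) (g := set_pid_bit)]
  rw [h1]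
  rw [show pidRangesInit = stA (ind 0 []) (ind 32 []) (ind 64 []) (ind 96 []) (ind 128 []) (ind 160 [])
        (ind 192 []) false false false false false false false none none none none none none none from by
      simp [pidRangesInit, stA, ind_nil]]
  rw [fold_sim false false false false false false false none none none none none none none _ hq []]
  simp only [List.nil_append]
  simp only [stA]
  rw [cont_sim hv]
  rw [ind_cont 0, ind_cont 32, ind_cont 64, ind_cont 96, ind_cont 128, ind_cont 160, ind_cont 192]
  simp only [ite_tf]
  rw [out_sim]
  rw [filterMap_out_cons, filterMap_out_cons, filterMap_out_cons, filterMap_out_cons,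
      filterMap_out_cons, filterMap_out_cons, filterMap_out_cons, List.filterMap_nil]
  rw [A_block 0 0 (by norm_num), A_block 1 32 (by norm_num), A_block 2 64 (by norm_num),
      A_block 3 96 (by norm_num), A_block 4 128 (by norm_num), A_block 5 160 (by norm_num),
      A_block 6 192 (by norm_num)]
  -- B side
  have hmaxSet := max_ofList _ hv hmax
  simp only [process_pids_alt]
  rw [hmaxSet, Option.getD_some]
  simp only [PySem.Set.mem_ofList]
  rw [show PySem.List.enumerate ["0100", "0120", "0140", "0160", "0180", "01A0", "01C0"]
        = [((0:Int),"0100"), (1,"0120"), (2,"0140"), (3,"0160"), (4,"0180"), (5,"01A0"), (6,"01C0")] from by decide]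
  simp only [List.foldl_cons, List.foldl_nil]
  rw [B_step, B_step, B_step, B_step, B_step, B_step, B_step]
  -- glue: normalize the continuation booleans
  rw [show (decide ((32:Int) * (0 + 1) ≤ hv)) = (decide ((32:Int) ≤ hv)) from by norm_num,
      show (decide ((32:Int) * (1 + 1) ≤ hv)) = (decide ((64:Int) ≤ hv)) from by norm_num,
      show (decide ((32:Int) * (2 + 1) ≤ hv)) = (decide ((96:Int) ≤ hv)) from by norm_num,
      show (decide ((32:Int) * (3 + 1) ≤ hv)) = (decide ((128:Int) ≤ hv)) from by norm_num,
      show (decide ((32:Int) * (4 + 1) ≤ hv)) = (decide ((160:Int) ≤ hv)) from by norm_num,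
      show (decide ((32:Int) * (5 + 1) ≤ hv)) = (decide ((192:Int) ≤ hv)) from by norm_num,
      show (decide ((32:Int) * (6 + 1) ≤ hv)) = (decide ((224:Int) ≤ hv)) from by norm_num]
  simp [List.append_assoc]
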